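-- pv_equiv track=rewrite | github.com/RaynfallLabs/PhilosophersQuest | src/npc_encounters.py | judge_karma
-- ===== SOURCE A (Python) =====
-- _JUDGMENT_TIERS = [
--     (-10, -6, 'abaddon_empowered',
--      "Michael weighs your soul and recoils.\n"
--      "\"You have walked in darkness.\"\n"
--      "The scales crash to the ground. A terrible power surges\n"
--      "toward the Pit below.\n\n"
--      "ABADDON IS EMPOWERED BY YOUR SINS."),
--
--     (-5, -1, 'locusts_strengthened',
--      "Michael weighs your soul and frowns.\n"
--      "\"Your deeds are wanting.\"\n"
--      "The scales tip toward shadow. A buzzing fills the air.\n\n"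
--      "THE LOCUST SWARMS GROW LARGER AND MORE NUMEROUS."),
--
--     (0, 0, 'silence',
--      "Michael weighs your soul.\n"
--      "The scales balance perfectly — and remain cold.\n"
--      "\"You have done nothing worthy of praise or condemnation.\"\n\n"
--      "The altar falls silent. You receive nothing."),
--
--     (1, 9, 'scales_granted',
--      "Michael weighs your soul and nods.\n"
--      "\"You have walked in light.\"\n"
--      "The scales glow with golden fire. They lift from the altar\n"
--      "and float into your hands.\n\n"
--      "YOU RECEIVE THE SCALES OF MICHAEL."),
--
--     (10, 10, 'sword_and_scales',
--      "Michael descends in a pillar of white fire. He kneels.\n"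
--      "\"In all the ages of this world, few mortals have walked\n"
--      "as you have walked. You gave when you had nothing.\n"
--      "You sacrificed when it would have been easier to take.\"\n"
--      "He places a flaming sword in your hands and anoints\n"
--      "your brow with light.\n"
--      "\"Rise, Paladin. Chosen of God.\n"
--      "The Destroyer will know your name.\"\n\n"
--      "YOU RECEIVE THE SWORD AND SCALES OF MICHAEL.\n"
--      "YOU ARE ANOINTED PALADIN AND CHOSEN OF GOD."),
-- ]
--
-- def judge_karma(karma: int) -> tuple[str, str]:
--     """Return (outcome_key, narrative_text) for the given karma score."""
--     karma = max(-10, min(10, karma))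
--     for lo, hi, key, text in _JUDGMENT_TIERS:
--         if lo <= karma <= hi:
--             return key, text
--     # Fallback (should be unreachable since loop covers clamped range)
--     if karma >= 10:
--         return _JUDGMENT_TIERS[4][2], _JUDGMENT_TIERS[4][3]
--     if karma > 0:
--         return _JUDGMENT_TIERS[3][2], _JUDGMENT_TIERS[3][3]
--     if karma < -5:
--         return _JUDGMENT_TIERS[0][2], _JUDGMENT_TIERS[0][3]
--     if karma < 0:
--         return _JUDGMENT_TIERS[1][2], _JUDGMENT_TIERS[1][3]
--     return _JUDGMENT_TIERS[2][2], _JUDGMENT_TIERS[2][3]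
-- ===== SOURCE B (Python) =====
-- # Tier lookup via binary search: _HI holds the sorted upper bounds of the five
-- # tiers; bisect_left (hand-rolled) finds the first tier whose upper bound is
-- # >= the clamped karma, and a parallel results list supplies the answer.
--
-- _HI = [-6, -1, 0, 9, 10]
--
-- _RESULTS = [
--     ('abaddon_empowered',
--      "Michael weighs your soul and recoils.\n"
--      "\"You have walked in darkness.\"\n"
--      "The scales crash to the ground. A terrible power surges\n"
--      "toward the Pit below.\n\n"
--      "ABADDON IS EMPOWERED BY YOUR SINS."),
--     ('locusts_strengthened',
--      "Michael weighs your soul and frowns.\n"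
--      "\"Your deeds are wanting.\"\n"
--      "The scales tip toward shadow. A buzzing fills the air.\n\n"
--      "THE LOCUST SWARMS GROW LARGER AND MORE NUMEROUS."),
--     ('silence',
--      "Michael weighs your soul.\n"
--      "The scales balance perfectly — and remain cold.\n"
--      "\"You have done nothing worthy of praise or condemnation.\"\n\n"
--      "The altar falls silent. You receive nothing."),
--     ('scales_granted',
--      "Michael weighs your soul and nods.\n"
--      "\"You have walked in light.\"\n"
--      "The scales glow with golden fire. They lift from the altar\n"
--      "and float into your hands.\n\n"
--      "YOU RECEIVE THE SCALES OF MICHAEL."),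
--     ('sword_and_scales',
--      "Michael descends in a pillar of white fire. He kneels.\n"
--      "\"In all the ages of this world, few mortals have walked\n"
--      "as you have walked. You gave when you had nothing.\n"
--      "You sacrificed when it would have been easier to take.\"\n"
--      "He places a flaming sword in your hands and anoints\n"
--      "your brow with light.\n"
--      "\"Rise, Paladin. Chosen of God.\n"
--      "The Destroyer will know your name.\"\n\n"
--      "YOU RECEIVE THE SWORD AND SCALES OF MICHAEL.\n"
--      "YOU ARE ANOINTED PALADIN AND CHOSEN OF GOD."),
-- ]
--
--
-- def judge_karma(karma: int) -> tuple[str, str]: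
--     """Return (outcome_key, narrative_text) for the given karma score."""
--     karma = max(-10, min(10, karma))
--     # bisect_left over the tier upper bounds
--     lo, hi = 0, len(_HI)
--     while lo < hi:
--         mid = (lo + hi) // 2
--         if _HI[mid] < karma:
--             lo = mid + 1
--         else:
--             hi = mid
--     return _RESULTS[lo]
-- ===== Notes on version B (the rewrite author's own statement) =====
-- stated objective: alternative
-- what changed: Replaced the linear scan of the (lo,hi,key,text) tier table and its dead fallback chain with a binary search (hand-rolled bisect_left) over a sorted list of tier upper bounds, indexing a parallel results list.
import Mathlib
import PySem

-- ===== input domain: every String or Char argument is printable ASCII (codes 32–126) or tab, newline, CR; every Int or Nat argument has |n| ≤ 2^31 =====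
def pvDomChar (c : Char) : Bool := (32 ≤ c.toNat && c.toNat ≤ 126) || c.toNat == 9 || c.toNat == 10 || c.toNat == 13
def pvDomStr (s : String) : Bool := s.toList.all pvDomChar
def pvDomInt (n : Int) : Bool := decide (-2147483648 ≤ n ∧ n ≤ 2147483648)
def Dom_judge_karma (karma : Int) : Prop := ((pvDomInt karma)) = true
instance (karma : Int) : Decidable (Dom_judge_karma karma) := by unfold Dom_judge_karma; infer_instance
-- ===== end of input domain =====

-- Header: B replaces A's linear tier-table scan (and dead fallback chain) by a binary
-- search over the sorted tier upper bounds into a parallel results list; objective: alternative.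

-- ===== PORT A =====
def judgmentTiers : List (Int × Int × String × String) := [
  (-10, -6, "abaddon_empowered",
   "Michael weighs your soul and recoils.\n\"You have walked in darkness.\"\nThe scales crash to the ground. A terrible power surges\ntoward the Pit below.\n\nABADDON IS EMPOWERED BY YOUR SINS."),
  (-5, -1, "locusts_strengthened",
   "Michael weighs your soul and frowns.\n\"Your deeds are wanting.\"\nThe scales tip toward shadow. A buzzing fills the air.\n\nTHE LOCUST SWARMS GROW LARGER AND MORE NUMEROUS."),
  (0, 0, "silence",
   "Michael weighs your soul.\nThe scales balance perfectly — and remain cold.\n\"You have done nothing worthy of praise or condemnation.\"\n\nThe altar falls silent. You receive nothing."),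
  (1, 9, "scales_granted",
   "Michael weighs your soul and nods.\n\"You have walked in light.\"\nThe scales glow with golden fire. They lift from the altar\nand float into your hands.\n\nYOU RECEIVE THE SCALES OF MICHAEL."),
  (10, 10, "sword_and_scales",
   "Michael descends in a pillar of white fire. He kneels.\n\"In all the ages of this world, few mortals have walked\nas you have walked. You gave when you had nothing.\nYou sacrificed when it would have been easier to take.\"\nHe places a flaming sword in your hands and anoints\nyour brow with light.\n\"Rise, Paladin. Chosen of God.\nThe Destroyer will know your name.\"\n\nYOU RECEIVE THE SWORD AND SCALES OF MICHAEL.\nYOU ARE ANOINTED PALADIN AND CHOSEN OF GOD.")]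

-- the 'for lo, hi, key, text in _JUDGMENT_TIERS: if lo <= karma <= hi: return ...' loop
def scanTiers (karma : Int) : List (Int × Int × String × String) → Option (String × String)
  | [] => none
  | (lo, hi, key, text) :: rest =>
      if lo ≤ karma ∧ karma ≤ hi then some (key, text) else scanTiers karma rest

-- body of A after the clamp (loop, then the dead fallback chain, transliterated)
def judgeKarmaBody (karma : Int) : String × String :=
  match scanTiers karma judgmentTiers with
  | some r => r
  | none =>
      if karma ≥ 10 then
        let t := judgmentTiers.getD 4 (0, 0, "", ""); (t.2.2.1, t.2.2.2)
      else if karma > 0 then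
        let t := judgmentTiers.getD 3 (0, 0, "", ""); (t.2.2.1, t.2.2.2)
      else if karma < -5 then
        let t := judgmentTiers.getD 0 (0, 0, "", ""); (t.2.2.1, t.2.2.2)
      else if karma < 0 then
        let t := judgmentTiers.getD 1 (0, 0, "", ""); (t.2.2.1, t.2.2.2)
      else
        let t := judgmentTiers.getD 2 (0, 0, "", ""); (t.2.2.1, t.2.2.2)

def judge_karma (karma : Int) : String × String :=
  judgeKarmaBody (max (-10) (min 10 karma))

-- ===== PORT B =====
-- _HI: sorted tier upper bounds; _RESULTS: parallel (key, text) list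
def pvHi : List Int := [-6, -1, 0, 9, 10]

def pvResults : List (String × String) := [
  ("abaddon_empowered",
   "Michael weighs your soul and recoils.\n\"You have walked in darkness.\"\nThe scales crash to the ground. A terrible power surges\ntoward the Pit below.\n\nABADDON IS EMPOWERED BY YOUR SINS."),
  ("locusts_strengthened",
   "Michael weighs your soul and frowns.\n\"Your deeds are wanting.\"\nThe scales tip toward shadow. A buzzing fills the air.\n\nTHE LOCUST SWARMS GROW LARGER AND MORE NUMEROUS."),
  ("silence",
   "Michael weighs your soul.\nThe scales balance perfectly — and remain cold.\n\"You have done nothing worthy of praise or condemnation.\"\n\nThe altar falls silent. You receive nothing."),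
  ("scales_granted",
   "Michael weighs your soul and nods.\n\"You have walked in light.\"\nThe scales glow with golden fire. They lift from the altar\nand float into your hands.\n\nYOU RECEIVE THE SCALES OF MICHAEL."),
  ("sword_and_scales",
   "Michael descends in a pillar of white fire. He kneels.\n\"In all the ages of this world, few mortals have walked\nas you have walked. You gave when you had nothing.\nYou sacrificed when it would have been easier to take.\"\nHe places a flaming sword in your hands and anoints\nyour brow with light.\n\"Rise, Paladin. Chosen of God.\nThe Destroyer will know your name.\"\n\nYOU RECEIVE THE SWORD AND SCALES OF MICHAEL.\nYOU ARE ANOINTED PALADIN AND CHOSEN OF GOD.")]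

-- the 'while lo < hi: mid = (lo+hi)//2; ...' bisect_left loop of Source B
def bisectLoop (karma : Int) (lo hi : Nat) : Nat :=
  if h : lo < hi then
    let mid := (lo + hi) / 2
    if pvHi.getD mid 0 < karma then bisectLoop karma (mid + 1) hi
    else bisectLoop karma lo mid
  else lo
termination_by hi - lo
decreasing_by all_goals omega

def judge_karma_alt (karma : Int) : String × String :=
  let k := max (-10) (min 10 karma)
  pvResults.getD (bisectLoop k 0 pvHi.length) ("", "")

-- ===== PRECONDITION & SPEC =====
def Spec_judge_karma (karma : Int) (out : String × String) : Prop := out = judge_karma_alt karma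
instance (karma : Int) (out : String × String) : Decidable (Spec_judge_karma karma out) := by unfold Spec_judge_karma; infer_instance

-- ===== CLAIM (what is proved, stated in full; the proofs are below) =====
def Claim_equal_judge_karma : Prop := ∀ (karma : Int), Dom_judge_karma karma → Spec_judge_karma karma (judge_karma karma)

-- ===== LEMMAS AND PROOFS =====
theorem body_eq_bisect (k : Int) (h1 : -10 ≤ k) (h2 : k ≤ 10) :
    judgeKarmaBody k = pvResults.getD (bisectLoop k 0 pvHi.length) ("", "") := by
  interval_cases k <;> simp [judgeKarmaBody, scanTiers, judgmentTiers, pvHi, pvResults, bisectLoop]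

-- ===== VERDICT (by name: the statement is the Claim_ definition above) =====
theorem judge_karma_spec : Claim_equal_judge_karma := by
  intro karma _
  unfold Spec_judge_karma judge_karma judge_karma_alt
  exact body_eq_bisect _ (le_max_left _ _) (max_le (by norm_num) (min_le_left _ _))
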